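-- pv_equiv track=rewrite | github.com/dns-114-academic/cryptographic-rng | generators/non_deterministic_and_hybrid_generators/xor_nrbg.py | xor_combine_bits
-- ===== SOURCE A (Python) =====
-- def xor_combine_bits(sources):
--     """
--     Bitwise XOR combination of multiple bit sequences.
--
--     Parameters:
--         sources : list of bit lists, e.g. [[1, 0, 1], [0, 1, 1], [1, 1, 0]]
--                   All inner lists must have the same length.
--
--     Returns:
--         List of XOR-combined bits
--     """
--     if not sources:
--         return []
--
--     n = len(sources[0])
--     result = []
--     for i in range(n):
--         bit = 0   # Neutral element: 0 XOR x = x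
--         for source in sources:
--             bit ^= source[i]
--         result.append(bit)
--     return result
-- ===== SOURCE B (Python) =====
-- def xor_combine_bits(sources):
--     if not sources:
--         return []
--     acc = list(sources[0])
--     for src in sources[1:]:
--         acc = [a ^ b for a, b in zip(acc, src)]
--     return acc
-- ===== Notes on version B (the rewrite author's own statement) =====
-- stated objective: alternative
-- what changed: B folds over the sources maintaining a running XOR vector (rebuilt each step by a zip comprehension pairing the accumulator with the next source), instead of A's per-column inner scan over all sources rebuilding the output column by column.
import Mathlib
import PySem

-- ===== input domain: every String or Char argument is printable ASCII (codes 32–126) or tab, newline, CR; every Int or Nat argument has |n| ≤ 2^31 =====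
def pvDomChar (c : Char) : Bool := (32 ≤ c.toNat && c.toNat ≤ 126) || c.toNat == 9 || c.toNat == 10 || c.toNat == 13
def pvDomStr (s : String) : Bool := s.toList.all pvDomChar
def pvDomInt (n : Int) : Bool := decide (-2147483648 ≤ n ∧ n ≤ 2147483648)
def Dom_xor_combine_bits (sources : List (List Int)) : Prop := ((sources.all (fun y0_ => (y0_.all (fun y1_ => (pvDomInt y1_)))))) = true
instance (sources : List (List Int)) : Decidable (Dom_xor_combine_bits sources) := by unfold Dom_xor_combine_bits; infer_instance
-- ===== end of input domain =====

-- B folds over the sources, rebuilding a running XOR vector by a zip comprehension at each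
-- step, instead of A's per-column inner scan; alternative decomposition, same cost.


-- ===== PORT A =====
def xor_combine_bits (sources : List (List Int)) : List Int :=
  match sources with
  | [] => []
  | s0 :: _ =>
    (PySem.List.pyRange 0 (s0.length : Int) 1).foldl
      (fun result i =>
        result ++ [sources.foldl (fun bit source => PySem.Int.bxor bit (PySem.List.pyGetD source i 0)) 0])
      []

-- ===== PORT B =====
def xor_combine_bits_alt (sources : List (List Int)) : List Int :=
  match sources with
  | [] => []
  | s0 :: rest =>
    rest.foldl (fun acc src => (acc.zip src).map (fun p => PySem.Int.bxor p.1 p.2)) s0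

-- ===== PRECONDITION & SPEC =====
-- Pre_ excludes exactly the inputs where some source is shorter than sources[0]
-- (Python A raises IndexError there).
def Pre_xor_combine_bits (sources : List (List Int)) : Prop :=
  ∀ s ∈ sources, (sources.headD []).length ≤ s.length
instance (sources : List (List Int)) : Decidable (Pre_xor_combine_bits sources) := by
  unfold Pre_xor_combine_bits; infer_instance
def pvWitness_xor_combine_bits : List (List Int) := [[1, 0, 1], [0, 1, 1], [1, 1, 0]]

def Spec_xor_combine_bits (sources : List (List Int)) (out : List Int) : Prop := out = xor_combine_bits_alt sources
instance (sources : List (List Int)) (out : List Int) : Decidable (Spec_xor_combine_bits sources out) := by unfold Spec_xor_combine_bits; infer_instance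

-- ===== CLAIM (what is proved, stated in full; the proofs are below) =====
def Claim_equal_xor_combine_bits : Prop := ∀ (sources : List (List Int)), Dom_xor_combine_bits sources → Pre_xor_combine_bits sources → Spec_xor_combine_bits sources (xor_combine_bits sources)

-- ===== LEMMAS AND PROOFS =====

-- One B-step: zip-map is pointwise XOR when the source is at least as long as the accumulator.
theorem zip_map_eq (res src : List Int) (h : res.length ≤ src.length) :
    (res.zip src).map (fun p => PySem.Int.bxor p.1 p.2)
      = (List.range res.length).map (fun j => PySem.Int.bxor (res.getD j 0) (src.getD j 0)) := by
  apply List.ext_getElem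
  · simp [Nat.min_eq_left h]
  · intro j hj _
    have hjr : j < res.length := by simp [Nat.min_eq_left h] at hj; exact hj
    have hjs : j < src.length := lt_of_lt_of_le hjr h
    simp [List.getElem_zip, List.getElem_range, List.getD_eq_getElem?_getD,
      List.getElem?_eq_getElem hjr, List.getElem?_eq_getElem hjs]

-- B's fold over the remaining sources, characterised column-wise.
theorem outer_eq (n : Nat) (rest : List (List Int)) :
    ∀ res : List Int, res.length = n → (∀ s ∈ rest, n ≤ s.length) →
      rest.foldl (fun acc src => (acc.zip src).map (fun p => PySem.Int.bxor p.1 p.2)) res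
        = (List.range n).map
            (fun j => rest.foldl (fun b s => PySem.Int.bxor b (s.getD j 0)) (res.getD j 0)) := by
  induction rest with
  | nil =>
    intro res hres _
    subst hres
    apply List.ext_getElem
    · simp
    · intro j hj _
      simp at hj
      simp [List.getElem_range, List.getD_eq_getElem?_getD, List.getElem?_eq_getElem hj]
  | cons src rest ih =>
    intro res hres hlen
    rw [List.foldl_cons,
      zip_map_eq res src (by rw [hres]; exact hlen src List.mem_cons_self), hres,
      ih _ (by simp) (fun s hs => hlen s (List.mem_cons_of_mem _ hs))]
    apply List.map_congr_left
    intro j hj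
    have hjn : j < n := List.mem_range.mp hj
    rw [PySem.List.getD_map_range _ _ _ _ hjn, List.foldl_cons]

-- A's result, characterised column-wise.
theorem A_shape (s0 : List Int) (rest : List (List Int)) :
    xor_combine_bits (s0 :: rest)
      = (List.range s0.length).map
          (fun j => (s0 :: rest).foldl (fun b s => PySem.Int.bxor b (s.getD j 0)) 0) := by
  simp only [xor_combine_bits]
  rw [PySem.List.pyRange_zero_nat, PySem.List.foldl_append_singleton_eq_map, List.map_map]
  simp [Function.comp, PySem.List.pyGetD_natCast]

-- ===== VERDICT (by name: the statement is the Claim_ definition above) =====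
theorem xor_combine_bits_spec : Claim_equal_xor_combine_bits := by
  intro sources _ hpre
  unfold Spec_xor_combine_bits
  match sources with
  | [] => rfl
  | s0 :: rest =>
    have hB : xor_combine_bits_alt (s0 :: rest)
        = (List.range s0.length).map
            (fun j => rest.foldl (fun b s => PySem.Int.bxor b (s.getD j 0)) (s0.getD j 0)) := by
      simp only [xor_combine_bits_alt]
      exact outer_eq s0.length rest s0 rfl
        (fun s hs => hpre s (List.mem_cons_of_mem _ hs))
    rw [A_shape, hB]
    apply List.map_congr_left
    intro j hj
    rw [List.foldl_cons]
    have h0 : PySem.Int.bxor 0 (s0.getD j 0) = s0.getD j 0 := by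
      rw [PySem.Int.bxor_comm]; exact PySem.Int.bxor_zero _
    rw [h0]
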